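-- pv_equiv track=rewrite | github.com/QSI-BAQS/transversal | rotated_layout.py | get_stabs
-- ===== SOURCE A (Python) =====
-- def get_stabs(d, padded):
-- 	grid = [[0 for i in range(2*d+1)] for j in range(2*d+1)]
-- 	c = 0
-- 	for j in range(1, d*2+1, 2):
-- 		for i in range(1, d*2+1, 2):
-- 			grid[j][i] = ("L", c)
-- 			c+=1
--
-- 	c = 0
-- 	for j in range(0, d*2+1, 2):
-- 		for i in range(2, d*2-1, 2):
-- 			if (i%4==2 and j%4==0) or (i%4==0 and j%4==2):
-- 				grid[j][i] = ("X", c)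
-- 				c+=1
--
-- 	c = 0
-- 	for j in range(2, d*2-1, 2):
-- 		for i in range(0, d*2+1, 2):
-- 			if (i%4==0 and j%4==0) or (i%4==2 and j%4==2):
-- 				grid[j][i] = ("Z", c)
-- 				c+=1
--
-- 	ancillas_X = []
-- 	ancillas_Z = []
--
--
-- 	for j in range(2*d+1):
-- 		for i in range(2*d+1):
-- 			if grid[j][i] != 0:
-- 				if grid[j][i][0] == "X":
-- 					ancillas_X.append([])
-- 					for a in [1,-1]:
-- 						for b in [1,-1]:
-- 							try:
-- 								ancillas_X[-1].append(grid[j+a][i+b][1])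
-- 							except:
-- 								pass
-- 					if padded:
-- 						while len(ancillas_X[-1]) != 4:
-- 							ancillas_X[-1].append(-1)
--
-- 				if grid[j][i][0] == "Z":
-- 					ancillas_Z.append([])
-- 					for a in [1,-1]:
-- 						for b in [1,-1]:
-- 							try:
-- 								ancillas_Z[-1].append(grid[j+a][i+b][1])
-- 							except:
-- 								pass
-- 					if padded:
-- 						while len(ancillas_Z[-1]) != 4:
-- 							ancillas_Z[-1].append(-1)
--
-- 	return ancillas_X, ancillas_Z
-- ===== SOURCE B (Python) =====
-- def get_stabs(d, padded):
--     n = 2 * d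
--
--     def neighbors(j, i):
--         out = []
--         for a in (1, -1):
--             for b in (1, -1):
--                 jj, ii = j + a, i + b
--                 if 0 <= jj <= n and 0 <= ii <= n:
--                     out.append(((jj - 1) // 2) * d + (ii - 1) // 2)
--         if padded:
--             out += [-1] * (4 - len(out))
--         return out
--
--     ancillas_X = [neighbors(j, i)
--                   for j in range(0, n + 1, 2)
--                   for i in range(2, n - 1, 2)
--                   if (i % 4 == 2 and j % 4 == 0) or (i % 4 == 0 and j % 4 == 2)]
--     ancillas_Z = [neighbors(j, i)
--                   for j in range(2, n - 1, 2)
--                   for i in range(0, n + 1, 2)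
--                   if (i % 4 == 0 and j % 4 == 0) or (i % 4 == 2 and j % 4 == 2)]
--     return ancillas_X, ancillas_Z
-- ===== Notes on version B (the rewrite author's own statement) =====
-- stated objective: simpler
-- what changed: B drops A's mutable (2d+1)x(2d+1) grid (three fill passes, a scan pass and try/except neighbour probing) and instead enumerates the X/Z stabilizer coordinates directly by range comprehensions, computing each data-qubit neighbour index by the closed formula ((j+a-1)//2)*d+(i+b-1)//2 guarded by a bounds check.
import Mathlib
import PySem

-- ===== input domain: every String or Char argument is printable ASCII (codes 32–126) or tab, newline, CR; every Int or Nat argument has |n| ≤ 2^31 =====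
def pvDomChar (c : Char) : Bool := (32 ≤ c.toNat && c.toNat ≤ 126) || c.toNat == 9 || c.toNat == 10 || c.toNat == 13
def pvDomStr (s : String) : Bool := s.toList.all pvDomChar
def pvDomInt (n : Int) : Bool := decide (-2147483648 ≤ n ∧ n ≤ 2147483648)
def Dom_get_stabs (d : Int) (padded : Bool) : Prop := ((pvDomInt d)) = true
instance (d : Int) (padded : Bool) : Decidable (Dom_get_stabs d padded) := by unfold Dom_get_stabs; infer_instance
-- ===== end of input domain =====

-- B replaces A's (2d+1)×(2d+1) mutable grid (three fill passes + a scan with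
-- try/except neighbour probing) by direct enumeration of the stabilizer
-- coordinates with a closed-form data-qubit index; same return value everywhere.

-- ===== PORT A =====
-- grid cell: Python's 0 ↦ none, ("L",c)/("X",c)/("Z",c) ↦ some (tag, c)

-- grid[j][i] = v  (all of A's writes are at in-range non-negative indices)
def pvSet2 (g : List (List (Option (String × Int)))) (j i : Int) (v : Option (String × Int)) :
    List (List (Option (String × Int))) :=
  PySem.List.pySetD g j (PySem.List.pySetD (PySem.List.pyGetD g j []) i v)

-- grid[j][i]  (read in the scan loop; indices there are in range)
def pvLookup (g : List (List (Option (String × Int)))) (j i : Int) : Option (String × Int) :=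
  PySem.List.pyGetD (PySem.List.pyGetD g j []) i none

-- grid = [[0 for i in range(2*d+1)] for j in range(2*d+1)]
def pvGridInit (d : Int) : List (List (Option (String × Int))) :=
  (PySem.List.pyRange 0 (2*d+1) 1).map (fun _ =>
    (PySem.List.pyRange 0 (2*d+1) 1).map (fun _ => (none : Option (String × Int))))

-- first fill loop: the "L" data qubits, counter c threaded through
def pvFillL (d : Int) (g : List (List (Option (String × Int)))) :
    List (List (Option (String × Int))) × Int :=
  (PySem.List.pyRange 1 (d*2+1) 2).foldl (fun s j =>
    (PySem.List.pyRange 1 (d*2+1) 2).foldl (fun s i =>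
      (pvSet2 s.1 j i (some ("L", s.2)), s.2 + 1)) s) (g, 0)

-- second fill loop: "X" ancillas
def pvFillX (d : Int) (g : List (List (Option (String × Int)))) :
    List (List (Option (String × Int))) × Int :=
  (PySem.List.pyRange 0 (d*2+1) 2).foldl (fun s j =>
    (PySem.List.pyRange 2 (d*2-1) 2).foldl (fun s i =>
      if (PySem.Int.mod i 4 == 2 && PySem.Int.mod j 4 == 0) ||
         (PySem.Int.mod i 4 == 0 && PySem.Int.mod j 4 == 2) then
        (pvSet2 s.1 j i (some ("X", s.2)), s.2 + 1)
      else s) s) (g, 0)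

-- third fill loop: "Z" ancillas
def pvFillZ (d : Int) (g : List (List (Option (String × Int)))) :
    List (List (Option (String × Int))) × Int :=
  (PySem.List.pyRange 2 (d*2-1) 2).foldl (fun s j =>
    (PySem.List.pyRange 0 (d*2+1) 2).foldl (fun s i =>
      if (PySem.Int.mod i 4 == 0 && PySem.Int.mod j 4 == 0) ||
         (PySem.Int.mod i 4 == 2 && PySem.Int.mod j 4 == 2) then
        (pvSet2 s.1 j i (some ("Z", s.2)), s.2 + 1)
      else s) s) (g, 0)

def pvBuildGrid (d : Int) : List (List (Option (String × Int))) :=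
  (pvFillZ d (pvFillX d (pvFillL d (pvGridInit d)).1).1).1

-- grid[j+a][i+b][1] inside try/except: none = the except branch was taken
-- (IndexError from pyGet? = none, or TypeError from subscripting the int 0 = cell none)
def pvTryNb (g : List (List (Option (String × Int)))) (j i : Int) : Option Int :=
  (PySem.List.pyGet? g j).bind fun row =>
    (PySem.List.pyGet? row i).bind fun c => c.map Prod.snd

-- for a in [1,-1]: for b in [1,-1]: try: append(...) except: pass
def pvNbA (g : List (List (Option (String × Int)))) (j i : Int) : List Int :=
  [(1 : Int), -1].foldl (fun l a =>
    [(1 : Int), -1].foldl (fun l b =>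
      match pvTryNb g (j + a) (i + b) with
      | some v => l ++ [v]
      | none => l) l) []

-- while len(cur) != 4: cur.append(-1)   (cur always has ≤ 4 elements, so < 4 ≡ ≠ 4)
def pvPad (l : List Int) : List Int :=
  if l.length < 4 then pvPad (l ++ [-1]) else l
termination_by 4 - l.length
decreasing_by simp; omega

def get_stabs (d : Int) (padded : Bool) : List (List Int) × List (List Int) :=
  let g := pvBuildGrid d
  (PySem.List.pyRange 0 (2*d+1) 1).foldl (fun s j =>
    (PySem.List.pyRange 0 (2*d+1) 1).foldl (fun s i =>
      match pvLookup g j i with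
      | none => s
      | some cell =>
        ((if cell.1 == "X" then
            s.1 ++ [(let cur := pvNbA g j i; if padded then pvPad cur else cur)]
          else s.1),
         (if cell.1 == "Z" then
            s.2 ++ [(let cur := pvNbA g j i; if padded then pvPad cur else cur)]
          else s.2))) s) (([], []) : List (List Int) × List (List Int))

-- ===== PORT B =====
-- neighbour list of the ancilla at (j,i): closed-form data-qubit indices,
-- kept iff the coordinate stays inside [0,2d]; optional -1 padding
def pvNbB (d : Int) (padded : Bool) (j i : Int) : List Int :=
  let n := 2*d
  let out := [(1 : Int), -1].foldl (fun l a =>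
    [(1 : Int), -1].foldl (fun l b =>
      if 0 ≤ j + a ∧ j + a ≤ n ∧ 0 ≤ i + b ∧ i + b ≤ n then
        l ++ [PySem.Int.floordiv (j + a - 1) 2 * d + PySem.Int.floordiv (i + b - 1) 2]
      else l) l) []
  if padded then out ++ List.replicate (4 - out.length) (-1) else out

def get_stabs_alt (d : Int) (padded : Bool) : List (List Int) × List (List Int) :=
  let n := 2*d
  ((PySem.List.pyRange 0 (n+1) 2).flatMap (fun j =>
      ((PySem.List.pyRange 2 (n-1) 2).filter (fun i =>
          (PySem.Int.mod i 4 == 2 && PySem.Int.mod j 4 == 0) ||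
          (PySem.Int.mod i 4 == 0 && PySem.Int.mod j 4 == 2))).map (fun i => pvNbB d padded j i)),
   (PySem.List.pyRange 2 (n-1) 2).flatMap (fun j =>
      ((PySem.List.pyRange 0 (n+1) 2).filter (fun i =>
          (PySem.Int.mod i 4 == 0 && PySem.Int.mod j 4 == 0) ||
          (PySem.Int.mod i 4 == 2 && PySem.Int.mod j 4 == 2))).map (fun i => pvNbB d padded j i)))

-- ===== PRECONDITION & SPEC =====
def Spec_get_stabs (d : Int) (padded : Bool) (out : List (List Int) × List (List Int)) : Prop := out = get_stabs_alt d padded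
instance (d : Int) (padded : Bool) (out : List (List Int) × List (List Int)) : Decidable (Spec_get_stabs d padded out) := by unfold Spec_get_stabs; infer_instance

-- ===== CLAIM (what is proved, stated in full; the proofs are below) =====
def Claim_equal_get_stabs : Prop := ∀ (d : Int) (padded : Bool), Dom_get_stabs d padded → Spec_get_stabs d padded (get_stabs d padded)

-- ===== LEMMAS AND PROOFS =====

-- ---------- basic notions ----------

def pvN (d : Int) : Nat := (2*d+1).toNat

def pvRect (d : Int) (g : List (List (Option (String × Int)))) : Prop :=
  g.length = pvN d ∧ ∀ row ∈ g, row.length = pvN d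

abbrev pvLpos (d j i : Int) : Prop :=
  j % 2 = 1 ∧ i % 2 = 1 ∧ 0 ≤ j ∧ j ≤ 2*d ∧ 0 ≤ i ∧ i ≤ 2*d

abbrev pvXpos (d j i : Int) : Prop :=
  j % 2 = 0 ∧ 0 ≤ j ∧ j ≤ 2*d ∧ i % 2 = 0 ∧ 2 ≤ i ∧ i ≤ 2*d - 2 ∧
    ((i % 4 = 2 ∧ j % 4 = 0) ∨ (i % 4 = 0 ∧ j % 4 = 2))

abbrev pvZpos (d j i : Int) : Prop :=
  j % 2 = 0 ∧ 2 ≤ j ∧ j ≤ 2*d - 2 ∧ i % 2 = 0 ∧ 0 ≤ i ∧ i ≤ 2*d ∧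
    ((i % 4 = 0 ∧ j % 4 = 0) ∨ (i % 4 = 2 ∧ j % 4 = 2))

def pvCellSpec (d : Int) (fX fZ : Int → Int → Int) (j i : Int) : Option (String × Int) :=
  if pvLpos d j i then some ("L", PySem.Int.floordiv (j-1) 2 * d + PySem.Int.floordiv (i-1) 2)
  else if pvXpos d j i then some ("X", fX j i)
  else if pvZpos d j i then some ("Z", fZ j i)
  else none

-- the (irrelevant) ancilla counter stored in the grid, read back from the grid itself
def pvIdxOf (d : Int) (j i : Int) : Int :=
  ((pvLookup (pvBuildGrid d) j i).map Prod.snd).getD 0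

-- ---------- list toolkit ----------

theorem pv_eq_of_sorted_mem (l1 l2 : List Int)
    (h1 : l1.Pairwise (· < ·)) (h2 : l2.Pairwise (· < ·))
    (hm : ∀ x, x ∈ l1 ↔ x ∈ l2) : l1 = l2 := by
  have n1 : l1.Nodup := h1.imp ne_of_lt
  have n2 : l2.Nodup := h2.imp ne_of_lt
  have hp : l1.Perm l2 := (List.perm_ext_iff_of_nodup n1 n2).mpr hm
  exact hp.eq_of_pairwise (fun a b _ _ hab hba => absurd hba (not_lt.mpr hab.le)) h1 h2

theorem pv_pairwise_pyRange_two (a b : Int) :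
    (PySem.List.pyRange a b 2).Pairwise (· < ·) := by
  rw [PySem.List.pyRange_of_pos a b (by norm_num)]
  exact List.Pairwise.map _ (fun x y (hxy : x < y) => by omega) List.pairwise_lt_range

theorem pv_mem_pyRange_two (a b x : Int) :
    x ∈ PySem.List.pyRange a b 2 ↔ a ≤ x ∧ x < b ∧ 2 ∣ x - a := by
  exact PySem.List.mem_pyRange_iff_of_pos (by norm_num) x

theorem pv_pyRange_two_nil (a b : Int) (h : b ≤ a) : PySem.List.pyRange a b 2 = [] := by
  rw [PySem.List.pyRange_of_pos a b (by norm_num)]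
  rw [if_neg (by omega)]
  simp

theorem pv_flatMap_filter_of_nil {α β : Type} (l : List α) (q : α → Bool) (h : α → List β)
    (hnil : ∀ x ∈ l, q x = false → h x = []) :
    l.flatMap h = (l.filter q).flatMap h := by
  induction l with
  | nil => rfl
  | cons x xs ih =>
    have ih' := ih (fun y hy hqy => hnil y (List.mem_cons_of_mem _ hy) hqy)
    rcases hq : q x with _ | _
    · rw [List.flatMap_cons, hnil x List.mem_cons_self hq, List.filter_cons, hq]
      simpa using ih'
    · rw [List.flatMap_cons, List.filter_cons, hq]
      simp [List.flatMap_cons, ih']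

theorem pv_flatMap_congr {α β : Type} (l : List α) (f g : α → List β)
    (h : ∀ x ∈ l, f x = g x) : l.flatMap f = l.flatMap g := by
  induction l with
  | nil => rfl
  | cons x xs ih =>
    rw [List.flatMap_cons, List.flatMap_cons, h x List.mem_cons_self,
      ih (fun y hy => h y (List.mem_cons_of_mem _ hy))]

-- ---------- grid lemmas ----------

theorem pv_rect_init (d : Int) : pvRect d (pvGridInit d) := by
  unfold pvRect pvGridInit pvN
  constructor
  · simp [PySem.List.length_pyRange_one]
  · intro row hrow
    rcases List.mem_map.mp hrow with ⟨x, _, rfl⟩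
    simp [PySem.List.length_pyRange_one]

theorem pv_lookup_init (d : Int) (j i : Int) (hj0 : 0 ≤ j) (hj1 : j < (pvN d : Int))
    (hi0 : 0 ≤ i) (hi1 : i < (pvN d : Int)) : pvLookup (pvGridInit d) j i = none := by
  have hr := pv_rect_init d
  unfold pvLookup
  rw [PySem.List.pyGetD_eq_getElem _ _ hj0 (by rw [hr.1]; exact hj1)]
  have hmem : (pvGridInit d)[j.toNat]'(by have := hr.1; omega) ∈ pvGridInit d := List.getElem_mem _
  rw [PySem.List.pyGetD_eq_getElem _ _ hi0 (by rw [hr.2 _ hmem]; exact hi1)]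
  unfold pvGridInit
  simp

theorem pv_rect_set2 (d : Int) (g : List (List (Option (String × Int)))) (hg : pvRect d g)
    (j i : Int) (v : Option (String × Int)) (hj0 : 0 ≤ j) (hj1 : j < (pvN d : Int)) :
    pvRect d (pvSet2 g j i v) := by
  unfold pvSet2
  rw [PySem.List.pySetD_of_nonneg _ _ hj0]
  constructor
  · rw [List.length_set]; exact hg.1
  · intro row hrow
    rcases List.mem_or_eq_of_mem_set hrow with h | h
    · exact hg.2 _ h
    · subst h
      rw [PySem.List.length_pySetD]
      have hjlt : j.toNat < g.length := by have := hg.1; omega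
      rw [PySem.List.pyGetD_eq_getElem _ _ hj0 (by have := hg.1; omega)]
      exact hg.2 _ (List.getElem_mem hjlt)

theorem pv_lookup_set2 (d : Int) (g : List (List (Option (String × Int)))) (hg : pvRect d g)
    (j i j' i' : Int) (v : Option (String × Int))
    (hj0 : 0 ≤ j) (hj1 : j < (pvN d : Int)) (hi0 : 0 ≤ i) (hi1 : i < (pvN d : Int))
    (hj0' : 0 ≤ j') (hj1' : j' < (pvN d : Int)) (hi0' : 0 ≤ i') (hi1' : i' < (pvN d : Int)) :
    pvLookup (pvSet2 g j i v) j' i' = if j' = j ∧ i' = i then v else pvLookup g j' i' := by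
  have hjlt : j.toNat < g.length := by have := hg.1; omega
  have hjlt' : j'.toNat < g.length := by have := hg.1; omega
  have hrowj : g[j.toNat].length = pvN d := hg.2 _ (List.getElem_mem hjlt)
  have hrowj' : g[j'.toNat].length = pvN d := hg.2 _ (List.getElem_mem hjlt')
  unfold pvSet2 pvLookup
  rw [PySem.List.pySetD_of_nonneg _ _ hj0,
      PySem.List.pyGetD_eq_getElem _ _ hj0 (by have := hg.1; omega),
      PySem.List.pySetD_of_nonneg _ _ hi0,
      PySem.List.pyGetD_eq_getElem _ _ hj0' (by rw [List.length_set]; have := hg.1; omega)]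
  rw [List.getElem_set]
  by_cases hje : j' = j
  · subst hje
    rw [if_pos (by omega)]
    rw [PySem.List.pyGetD_eq_getElem _ _ hi0' (by rw [List.length_set, hrowj']; exact hi1')]
    rw [List.getElem_set]
    by_cases hie : i' = i
    · subst hie
      rw [if_pos (by omega), if_pos ⟨rfl, rfl⟩]
    · rw [if_neg (by omega), if_neg (by tauto)]
      rw [PySem.List.pyGetD_eq_getElem _ _ hj0' (by have := hg.1; omega),
          PySem.List.pyGetD_eq_getElem _ _ hi0' (by rw [hrowj']; exact hi1')]
  · rw [if_neg (by omega), if_neg (by tauto)]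
    rw [PySem.List.pyGetD_eq_getElem _ _ hj0' (by have := hg.1; omega),
        PySem.List.pyGetD_eq_getElem _ _ hi0' (by rw [hrowj']; exact hi1')]

theorem pv_fillL_inner (d : Int) (j : Int) (hj0 : 0 ≤ j) (hj1 : j < (pvN d : Int))
    (m s : Nat) (hms : (s : Int) + m ≤ d) :
    ∀ (p : List (List (Option (String × Int))) × Int), pvRect d p.1 →
    (let r := ((List.range m).map (fun k : Nat => (1 + 2*((s:Int) + (k:Int)) : Int))).foldl
        (fun st i => (pvSet2 st.1 j i (some ("L", st.2)), st.2 + 1)) p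
     pvRect d r.1 ∧ r.2 = p.2 + m ∧ ∀ j' i', 0 ≤ j' → j' < (pvN d : Int) → 0 ≤ i' → i' < (pvN d : Int) →
       pvLookup r.1 j' i' =
         if j' = j ∧ i' % 2 = 1 ∧ 1 + 2*(s:Int) ≤ i' ∧ i' < 1 + 2*((s:Int)+m) then
           some ("L", p.2 + (i' - 1)/2 - s)
         else pvLookup p.1 j' i') := by
  induction m generalizing s with
  | zero =>
    intro p hp
    simp only [List.range_zero, List.map_nil, List.foldl_nil]
    refine ⟨hp, by simp, ?_⟩
    intro j' i' _ _ _ _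
    rw [if_neg (by omega)]
  | succ m ih =>
    intro p hp
    have hN : (pvN d : Int) = 2*d+1 := by unfold pvN; omega
    have hi0 : (0:Int) ≤ 1 + 2*(s:Int) := by omega
    have hi1 : 1 + 2*(s:Int) < (pvN d : Int) := by omega
    have hmap : (List.range (m+1)).map (fun k : Nat => (1 + 2*((s:Int) + (k:Int)) : Int)) =
        (1 + 2*(s:Int)) :: (List.range m).map (fun k : Nat => (1 + 2*(((s+1:Nat)):Int) + (k:Int) * 0 + 2*(k:Int) : Int)) := by
      rw [List.range_succ_eq_map, List.map_cons, List.map_map]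
      refine congrArg₂ _ (by push_cast; ring) ?_
      refine List.map_congr_left (fun k _ => ?_)
      simp only [Function.comp]
      push_cast; ring
    rw [hmap]
    simp only [List.foldl_cons]
    have hg' : pvRect d (pvSet2 p.1 j (1 + 2*(s:Int)) (some ("L", p.2))) :=
      pv_rect_set2 d p.1 hp _ _ _ hj0 hj1
    have hrec := ih (s+1) (by push_cast; omega)
      (pvSet2 p.1 j (1 + 2*(s:Int)) (some ("L", p.2)), p.2 + 1) hg'
    have harg : (List.range m).map (fun k : Nat => (1 + 2*(((s+1:Nat)):Int) + (k:Int) * 0 + 2*(k:Int) : Int)) =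
        (List.range m).map (fun k : Nat => (1 + 2*(((s+1:Nat):Int) + (k:Int)) : Int)) := by
      refine List.map_congr_left (fun k _ => by push_cast; ring)
    rw [harg]
    dsimp only at hrec
    refine ⟨hrec.1, ?_, ?_⟩
    · rw [hrec.2.1]; push_cast; ring
    · intro j' i' hj0' hj1' hi0' hi1'
      rw [hrec.2.2 j' i' hj0' hj1' hi0' hi1']
      rw [pv_lookup_set2 d p.1 hp j _ j' i' _ hj0 hj1 hi0 hi1 hj0' hj1' hi0' hi1']
      by_cases hc : j' = j ∧ i' % 2 = 1 ∧ 1 + 2*(s:Int) ≤ i' ∧ i' < 1 + 2*((s:Int)+(m+1:Nat))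
      · rw [if_pos hc]
        by_cases hfst : i' = 1 + 2*(s:Int)
        · rw [if_neg (by push_cast; omega), if_pos ⟨hc.1, hfst⟩]
          congr 2
          omega
        · rw [if_pos (by push_cast at *; omega)]
          congr 2
          push_cast
          omega
      · rw [if_neg (by push_cast at *; omega), if_neg (by push_cast at *; omega), if_neg hc]

theorem pv_fillL_outer (d : Int) (hd : 1 ≤ d)
    (m s : Nat) (hms : (s : Int) + m ≤ d) :
    ∀ (p : List (List (Option (String × Int))) × Int), pvRect d p.1 →
    (let r := ((List.range m).map (fun k : Nat => (1 + 2*((s:Int) + (k:Int)) : Int))).foldl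
        (fun st j => (PySem.List.pyRange 1 (d*2+1) 2).foldl
          (fun st i => (pvSet2 st.1 j i (some ("L", st.2)), st.2 + 1)) st) p
     pvRect d r.1 ∧ ∀ j' i', 0 ≤ j' → j' < (pvN d : Int) → 0 ≤ i' → i' < (pvN d : Int) →
       pvLookup r.1 j' i' =
         if j' % 2 = 1 ∧ 1 + 2*(s:Int) ≤ j' ∧ j' < 1 + 2*((s:Int)+m) ∧ i' % 2 = 1 then
           some ("L", p.2 + ((j' - 1)/2 - s)*d + (i' - 1)/2)
         else pvLookup p.1 j' i') := by
  have hN : (pvN d : Int) = 2*d+1 := by unfold pvN; omega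
  have hir : PySem.List.pyRange 1 (d*2+1) 2 =
      (List.range d.toNat).map (fun k : Nat => (1 + 2*(((0:Nat):Int) + (k:Int)) : Int)) := by
    rw [PySem.List.pyRange_of_pos 1 (d*2+1) (by norm_num), if_pos (by omega)]
    have he : ((d*2+1 - 1 + 2 - 1)/2).toNat = d.toNat := by omega
    rw [he]
    exact List.map_congr_left (fun k _ => by push_cast; ring)
  induction m generalizing s with
  | zero =>
    intro p hp
    simp only [List.range_zero, List.map_nil, List.foldl_nil]
    refine ⟨hp, ?_⟩
    intro j' i' _ _ _ _
    rw [if_neg (by omega)]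
  | succ m ih =>
    intro p hp
    have hmap : (List.range (m+1)).map (fun k : Nat => (1 + 2*((s:Int) + (k:Int)) : Int)) =
        (1 + 2*(s:Int)) :: (List.range m).map (fun k : Nat => (1 + 2*(((s+1:Nat)):Int) + (k:Int) * 0 + 2*(k:Int) : Int)) := by
      rw [List.range_succ_eq_map, List.map_cons, List.map_map]
      refine congrArg₂ _ (by push_cast; ring) ?_
      refine List.map_congr_left (fun k _ => ?_)
      simp only [Function.comp]
      push_cast; ring
    rw [hmap]
    simp only [List.foldl_cons]
    have hj0r : (0:Int) ≤ 1 + 2*(s:Int) := by omega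
    have hj1r : 1 + 2*(s:Int) < (pvN d : Int) := by omega
    have hinner0 := pv_fillL_inner d (1 + 2*(s:Int)) hj0r hj1r d.toNat 0 (by omega) p hp
    rw [← hir] at hinner0
    obtain ⟨hrect1, hcnt1, hlook1⟩ := hinner0
    have hrec := ih (s+1) (by push_cast; omega) _ hrect1
    have harg : (List.range m).map (fun k : Nat => (1 + 2*(((s+1:Nat)):Int) + (k:Int) * 0 + 2*(k:Int) : Int)) =
        (List.range m).map (fun k : Nat => (1 + 2*(((s+1:Nat):Int) + (k:Int)) : Int)) := by
      refine List.map_congr_left (fun k _ => by push_cast; ring)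
    rw [harg]
    refine ⟨hrec.1, ?_⟩
    intro j' i' hj0' hj1' hi0' hi1'
    rw [hrec.2 j' i' hj0' hj1' hi0' hi1']
    rw [hcnt1]
    by_cases hc : j' % 2 = 1 ∧ 1 + 2*(s:Int) ≤ j' ∧ j' < 1 + 2*((s:Int)+(m+1:Nat)) ∧ i' % 2 = 1
    · rw [if_pos hc]
      by_cases hfst : j' = 1 + 2*(s:Int)
      · rw [if_neg (by push_cast; omega)]
        rw [hlook1 j' i' hj0' hj1' hi0' hi1']
        rw [if_pos (by push_cast; omega)]
        subst hfst
        congr 2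
        push_cast
        rw [show ((1 + 2*(s:Int) - 1)/2 - (s:Int)) * d = 0 from by
          rw [show ((1 + 2*(s:Int) - 1)/2 - (s:Int)) = 0 from by omega]; ring]
        omega
      · rw [if_pos (by push_cast at *; omega)]
        congr 2
        push_cast
        rw [show ((d.toNat : Int)) = d from by omega]
        ring
    · rw [if_neg (by push_cast at *; omega)]
      rw [hlook1 j' i' hj0' hj1' hi0' hi1']
      rw [if_neg (by push_cast at *; omega), if_neg hc]

theorem pv_fillL_spec (d : Int) (hd : 1 ≤ d) :
    pvRect d (pvFillL d (pvGridInit d)).1 ∧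
    ∀ j i, 0 ≤ j → j < (pvN d : Int) → 0 ≤ i → i < (pvN d : Int) →
      pvLookup (pvFillL d (pvGridInit d)).1 j i =
        if j % 2 = 1 ∧ i % 2 = 1 then
          some ("L", PySem.Int.floordiv (j-1) 2 * d + PySem.Int.floordiv (i-1) 2)
        else none := by
  have hN : (pvN d : Int) = 2*d+1 := by unfold pvN; omega
  have hir : PySem.List.pyRange 1 (d*2+1) 2 =
      (List.range d.toNat).map (fun k : Nat => (1 + 2*(((0:Nat):Int) + (k:Int)) : Int)) := by
    rw [PySem.List.pyRange_of_pos 1 (d*2+1) (by norm_num), if_pos (by omega)]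
    have he : ((d*2+1 - 1 + 2 - 1)/2).toNat = d.toNat := by omega
    rw [he]
    exact List.map_congr_left (fun k _ => by push_cast; ring)
  have houter := pv_fillL_outer d hd d.toNat 0 (by omega) (pvGridInit d, 0) (pv_rect_init d)
  rw [← hir] at houter
  unfold pvFillL
  refine ⟨houter.1, ?_⟩
  intro j i hj0 hj1 hi0 hi1
  rw [houter.2 j i hj0 hj1 hi0 hi1]
  by_cases hc : j % 2 = 1 ∧ i % 2 = 1
  · rw [if_pos (by push_cast; omega), if_pos hc]
    congr 2
    rw [PySem.Int.floordiv_eq_ediv_of_pos (by norm_num : (0:Int) < 2),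
        PySem.Int.floordiv_eq_ediv_of_pos (by norm_num : (0:Int) < 2)]
    push_cast
    ring
  · rw [if_neg (by push_cast; omega), if_neg hc]
    exact pv_lookup_init d j i hj0 hj1 hi0 hi1

-- generic tag-fill lemma: covers the X and Z fill loops (the stored counter is existential)
theorem pv_tagFill_row (d : Int) (tag : String) (cond : Int → Int → Bool) (j : Int)
    (hj0 : 0 ≤ j) (hj1 : j < (pvN d : Int)) :
    ∀ (ir : List Int), (∀ i ∈ ir, 0 ≤ i ∧ i < (pvN d : Int)) →
    ∀ (p : List (List (Option (String × Int))) × Int), pvRect d p.1 →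
    (let r := ir.foldl (fun st i => if cond j i then (pvSet2 st.1 j i (some (tag, st.2)), st.2 + 1) else st) p
     pvRect d r.1 ∧ ∀ j' i', 0 ≤ j' → j' < (pvN d : Int) → 0 ≤ i' → i' < (pvN d : Int) →
       (¬ (j' = j ∧ i' ∈ ir ∧ cond j i' = true) → pvLookup r.1 j' i' = pvLookup p.1 j' i') ∧
       ((j' = j ∧ i' ∈ ir ∧ cond j i' = true) → ∃ c, pvLookup r.1 j' i' = some (tag, c))) := by
  intro ir
  induction ir with
  | nil =>
    intro _ p hp
    refine ⟨hp, ?_⟩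
    intro j' i' _ _ _ _
    exact ⟨fun _ => rfl, fun h => absurd h.2.1 (List.not_mem_nil)⟩
  | cons i rest ih =>
    intro hir p hp
    have hi0 : 0 ≤ i := (hir i List.mem_cons_self).1
    have hi1 : i < (pvN d : Int) := (hir i List.mem_cons_self).2
    have hir' : ∀ x ∈ rest, 0 ≤ x ∧ x < (pvN d : Int) :=
      fun x hx => hir x (List.mem_cons_of_mem _ hx)
    simp only [List.foldl_cons]
    by_cases hcd : cond j i = true
    · rw [if_pos hcd]
      have hp' : pvRect d (pvSet2 p.1 j i (some (tag, p.2))) := pv_rect_set2 d p.1 hp _ _ _ hj0 hj1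
      have hrec := ih hir' (pvSet2 p.1 j i (some (tag, p.2)), p.2 + 1) hp'
      dsimp only at hrec
      refine ⟨hrec.1, ?_⟩
      intro j' i' hj0' hj1' hi0' hi1'
      have hset := pv_lookup_set2 d p.1 hp j i j' i' (some (tag, p.2))
        hj0 hj1 hi0 hi1 hj0' hj1' hi0' hi1'
      constructor
      · intro hnc
        have hnr : ¬ (j' = j ∧ i' ∈ rest ∧ cond j i' = true) := by
          intro h; exact hnc ⟨h.1, List.mem_cons_of_mem _ h.2.1, h.2.2⟩
        rw [(hrec.2 j' i' hj0' hj1' hi0' hi1').1 hnr, hset,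
          if_neg (by rintro ⟨rfl, rfl⟩; exact hnc ⟨rfl, List.mem_cons_self, hcd⟩)]
      · intro hc
        by_cases hrest : j' = j ∧ i' ∈ rest ∧ cond j i' = true
        · exact (hrec.2 j' i' hj0' hj1' hi0' hi1').2 hrest
        · have hie : i' = i := by
            rcases List.mem_cons.mp hc.2.1 with h | h
            · exact h
            · exact absurd ⟨hc.1, h, hc.2.2⟩ hrest
          rw [(hrec.2 j' i' hj0' hj1' hi0' hi1').1 hrest, hset, if_pos ⟨hc.1, hie⟩]
          exact ⟨p.2, rfl⟩
    · rw [if_neg hcd]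
      have hrec := ih hir' p hp
      refine ⟨hrec.1, ?_⟩
      intro j' i' hj0' hj1' hi0' hi1'
      constructor
      · intro hnc
        refine (hrec.2 j' i' hj0' hj1' hi0' hi1').1 ?_
        intro h; exact hnc ⟨h.1, List.mem_cons_of_mem _ h.2.1, h.2.2⟩
      · intro hc
        have hmem : i' ∈ rest := by
          rcases List.mem_cons.mp hc.2.1 with h | h
          · subst h; exact absurd hc.2.2 hcd
          · exact h
        exact (hrec.2 j' i' hj0' hj1' hi0' hi1').2 ⟨hc.1, hmem, hc.2.2⟩

theorem pv_tagFill (d : Int) (tag : String) (cond : Int → Int → Bool) :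
    ∀ (jr : List Int), (∀ j ∈ jr, 0 ≤ j ∧ j < (pvN d : Int)) →
    ∀ (ir : List Int), (∀ i ∈ ir, 0 ≤ i ∧ i < (pvN d : Int)) →
    ∀ (p : List (List (Option (String × Int))) × Int), pvRect d p.1 →
    (let r := jr.foldl (fun st j => ir.foldl
        (fun st i => if cond j i then (pvSet2 st.1 j i (some (tag, st.2)), st.2 + 1) else st) st) p
     pvRect d r.1 ∧ ∀ j' i', 0 ≤ j' → j' < (pvN d : Int) → 0 ≤ i' → i' < (pvN d : Int) →
       (¬ (j' ∈ jr ∧ i' ∈ ir ∧ cond j' i' = true) → pvLookup r.1 j' i' = pvLookup p.1 j' i') ∧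
       ((j' ∈ jr ∧ i' ∈ ir ∧ cond j' i' = true) → ∃ c, pvLookup r.1 j' i' = some (tag, c))) := by
  intro jr
  induction jr with
  | nil =>
    intro _ ir hir p hp
    refine ⟨hp, ?_⟩
    intro j' i' _ _ _ _
    exact ⟨fun _ => rfl, fun h => absurd h.1 (List.not_mem_nil)⟩
  | cons j rest ih =>
    intro hjr ir hir p hp
    have hj0 : 0 ≤ j := (hjr j List.mem_cons_self).1
    have hj1 : j < (pvN d : Int) := (hjr j List.mem_cons_self).2
    have hjr' : ∀ x ∈ rest, 0 ≤ x ∧ x < (pvN d : Int) :=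
      fun x hx => hjr x (List.mem_cons_of_mem _ hx)
    simp only [List.foldl_cons]
    have hrow := pv_tagFill_row d tag cond j hj0 hj1 ir hir p hp
    have hrec := ih hjr' ir hir _ hrow.1
    refine ⟨hrec.1, ?_⟩
    intro j' i' hj0' hj1' hi0' hi1'
    constructor
    · intro hnc
      have hnr : ¬ (j' ∈ rest ∧ i' ∈ ir ∧ cond j' i' = true) := by
        intro h; exact hnc ⟨List.mem_cons_of_mem _ h.1, h.2⟩
      rw [(hrec.2 j' i' hj0' hj1' hi0' hi1').1 hnr]
      refine (hrow.2 j' i' hj0' hj1' hi0' hi1').1 ?_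
      rintro ⟨rfl, h2⟩
      exact hnc ⟨List.mem_cons_self, h2⟩
    · intro hc
      by_cases hrest : j' ∈ rest ∧ i' ∈ ir ∧ cond j' i' = true
      · exact (hrec.2 j' i' hj0' hj1' hi0' hi1').2 hrest
      · have hje : j' = j := by
          rcases List.mem_cons.mp hc.1 with h | h
          · exact h
          · exact absurd ⟨h, hc.2⟩ hrest
        rw [(hrec.2 j' i' hj0' hj1' hi0' hi1').1 hrest]
        subst hje
        exact (hrow.2 j' i' hj0' hj1' hi0' hi1').2 ⟨rfl, hc.2⟩

theorem pv_grid_spec (d : Int) (hd : 1 ≤ d) :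
    pvRect d (pvBuildGrid d) ∧
    ∀ j i, 0 ≤ j → j < (pvN d : Int) → 0 ≤ i → i < (pvN d : Int) →
      pvLookup (pvBuildGrid d) j i = pvCellSpec d (pvIdxOf d) (pvIdxOf d) j i := by
  have hN : (pvN d : Int) = 2*d+1 := by unfold pvN; omega
  have hL := pv_fillL_spec d hd
  have hjrX : ∀ x ∈ PySem.List.pyRange 0 (d*2+1) 2, 0 ≤ x ∧ x < (pvN d : Int) := by
    intro x hx; rw [pv_mem_pyRange_two] at hx; omega
  have hirX : ∀ x ∈ PySem.List.pyRange 2 (d*2-1) 2, 0 ≤ x ∧ x < (pvN d : Int) := by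
    intro x hx; rw [pv_mem_pyRange_two] at hx; omega
  have hX := pv_tagFill d "X"
    (fun j i => (PySem.Int.mod i 4 == 2 && PySem.Int.mod j 4 == 0) ||
                (PySem.Int.mod i 4 == 0 && PySem.Int.mod j 4 == 2))
    (PySem.List.pyRange 0 (d*2+1) 2) hjrX (PySem.List.pyRange 2 (d*2-1) 2) hirX
    ((pvFillL d (pvGridInit d)).1, 0) hL.1
  dsimp only at hX
  have hZ := pv_tagFill d "Z"
    (fun j i => (PySem.Int.mod i 4 == 0 && PySem.Int.mod j 4 == 0) ||
                (PySem.Int.mod i 4 == 2 && PySem.Int.mod j 4 == 2))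
    (PySem.List.pyRange 2 (d*2-1) 2) hirX (PySem.List.pyRange 0 (d*2+1) 2) hjrX
    ((pvFillX d (pvFillL d (pvGridInit d)).1).1, 0) hX.1
  dsimp only at hZ
  have hBG : pvBuildGrid d = (pvFillZ d (pvFillX d (pvFillL d (pvGridInit d)).1).1).1 := rfl
  have hFX : (pvFillX d (pvFillL d (pvGridInit d)).1) =
      (PySem.List.pyRange 0 (d*2+1) 2).foldl (fun st j =>
        (PySem.List.pyRange 2 (d*2-1) 2).foldl (fun st i =>
          if (PySem.Int.mod i 4 == 2 && PySem.Int.mod j 4 == 0) ||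
             (PySem.Int.mod i 4 == 0 && PySem.Int.mod j 4 == 2) then
            (pvSet2 st.1 j i (some ("X", st.2)), st.2 + 1)
          else st) st) ((pvFillL d (pvGridInit d)).1, 0) := rfl
  have hFZ : (pvFillZ d (pvFillX d (pvFillL d (pvGridInit d)).1).1) =
      (PySem.List.pyRange 2 (d*2-1) 2).foldl (fun st j =>
        (PySem.List.pyRange 0 (d*2+1) 2).foldl (fun st i =>
          if (PySem.Int.mod i 4 == 0 && PySem.Int.mod j 4 == 0) ||
             (PySem.Int.mod i 4 == 2 && PySem.Int.mod j 4 == 2) then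
            (pvSet2 st.1 j i (some ("Z", st.2)), st.2 + 1)
          else st) st) ((pvFillX d (pvFillL d (pvGridInit d)).1).1, 0) := rfl
  rw [hFX] at hZ
  rw [hBG, hFZ, hFX]
  constructor
  · exact hZ.1
  intro j i hj0 hj1 hi0 hi1
  have hcx : ∀ x y : Int, ((PySem.Int.mod y 4 == 2 && PySem.Int.mod x 4 == 0) ||
      (PySem.Int.mod y 4 == 0 && PySem.Int.mod x 4 == 2)) = true ↔
      ((y % 4 = 2 ∧ x % 4 = 0) ∨ (y % 4 = 0 ∧ x % 4 = 2)) := by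
    intro x y
    simp [PySem.Int.mod_eq_emod_of_pos (show (0:Int) < 4 by norm_num)]
  have hXiff : (j ∈ PySem.List.pyRange 0 (d*2+1) 2 ∧ i ∈ PySem.List.pyRange 2 (d*2-1) 2 ∧
      ((PySem.Int.mod i 4 == 2 && PySem.Int.mod j 4 == 0) ||
       (PySem.Int.mod i 4 == 0 && PySem.Int.mod j 4 == 2)) = true) ↔ pvXpos d j i := by
    rw [pv_mem_pyRange_two, pv_mem_pyRange_two, hcx]
    unfold pvXpos
    constructor
    · rintro ⟨h1, h2, h3⟩; omega
    · intro h; omega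
  have hZiff : (j ∈ PySem.List.pyRange 2 (d*2-1) 2 ∧ i ∈ PySem.List.pyRange 0 (d*2+1) 2 ∧
      ((PySem.Int.mod i 4 == 0 && PySem.Int.mod j 4 == 0) ||
       (PySem.Int.mod i 4 == 2 && PySem.Int.mod j 4 == 2)) = true) ↔ pvZpos d j i := by
    rw [pv_mem_pyRange_two, pv_mem_pyRange_two]
    have hcz : ((PySem.Int.mod i 4 == 0 && PySem.Int.mod j 4 == 0) ||
        (PySem.Int.mod i 4 == 2 && PySem.Int.mod j 4 == 2)) = true ↔
        ((i % 4 = 0 ∧ j % 4 = 0) ∨ (i % 4 = 2 ∧ j % 4 = 2)) := by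
      simp [PySem.Int.mod_eq_emod_of_pos (show (0:Int) < 4 by norm_num)]
    rw [hcz]
    unfold pvZpos
    constructor
    · rintro ⟨h1, h2, h3⟩; omega
    · intro h; omega
  have hLlook := hL.2 j i hj0 hj1 hi0 hi1
  have hXc := hX.2 j i hj0 hj1 hi0 hi1
  have hZc := hZ.2 j i hj0 hj1 hi0 hi1
  unfold pvCellSpec
  by_cases hLp : pvLpos d j i
  · have hnx : ¬ pvXpos d j i := by unfold pvLpos at hLp; unfold pvXpos; omega
    have hnz : ¬ pvZpos d j i := by unfold pvLpos at hLp; unfold pvZpos; omega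
    rw [if_pos hLp, hZc.1 (by rw [hZiff]; exact hnz), hXc.1 (by rw [hXiff]; exact hnx), hLlook,
      if_pos (by unfold pvLpos at hLp; exact ⟨hLp.1, hLp.2.1⟩)]
  · rw [if_neg hLp]
    by_cases hXp : pvXpos d j i
    · have hnz : ¬ pvZpos d j i := by unfold pvXpos at hXp; unfold pvZpos; omega
      obtain ⟨c, hc⟩ := hXc.2 (by rw [hXiff]; exact hXp)
      rw [if_pos hXp, hZc.1 (by rw [hZiff]; exact hnz), hc]
      unfold pvIdxOf
      rw [show pvLookup (pvBuildGrid d) j i =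
        pvLookup ((PySem.List.pyRange 2 (d*2-1) 2).foldl (fun st j =>
          (PySem.List.pyRange 0 (d*2+1) 2).foldl (fun st i =>
            if (PySem.Int.mod i 4 == 0 && PySem.Int.mod j 4 == 0) ||
               (PySem.Int.mod i 4 == 2 && PySem.Int.mod j 4 == 2) then
              (pvSet2 st.1 j i (some ("Z", st.2)), st.2 + 1)
            else st) st) ((pvFillX d (pvFillL d (pvGridInit d)).1).1, 0)).1 j i from by rw [← hFZ, ← hBG]]
      rw [hFX]
      rw [hZc.1 (by rw [hZiff]; exact hnz), hc]
      simp
    · rw [if_neg hXp]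
      by_cases hZp : pvZpos d j i
      · obtain ⟨c, hc⟩ := hZc.2 (by rw [hZiff]; exact hZp)
        rw [if_pos hZp, hc]
        unfold pvIdxOf
        rw [show pvLookup (pvBuildGrid d) j i =
          pvLookup ((PySem.List.pyRange 2 (d*2-1) 2).foldl (fun st j =>
            (PySem.List.pyRange 0 (d*2+1) 2).foldl (fun st i =>
              if (PySem.Int.mod i 4 == 0 && PySem.Int.mod j 4 == 0) ||
                 (PySem.Int.mod i 4 == 2 && PySem.Int.mod j 4 == 2) then
                (pvSet2 st.1 j i (some ("Z", st.2)), st.2 + 1)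
              else st) st) ((pvFillX d (pvFillL d (pvGridInit d)).1).1, 0)).1 j i from by rw [← hFZ, ← hBG]]
        rw [hFX]
        rw [hc]
        simp
      · rw [if_neg hZp, hZc.1 (by rw [hZiff]; exact hZp), hXc.1 (by rw [hXiff]; exact hXp), hLlook,
          if_neg (by unfold pvLpos at hLp; omega)]

-- ---------- neighbour probing ----------

theorem pv_tryNb_char (d : Int) (hd : 1 ≤ d) (jj ii : Int)
    (hjj : jj % 2 = 1) (hii : ii % 2 = 1)
    (hjl : -1 ≤ jj) (hjr : jj ≤ 2*d+1) (hil : -1 ≤ ii) (hir : ii ≤ 2*d+1) :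
    pvTryNb (pvBuildGrid d) jj ii =
      if 0 ≤ jj ∧ jj ≤ 2*d ∧ 0 ≤ ii ∧ ii ≤ 2*d then
        some (PySem.Int.floordiv (jj-1) 2 * d + PySem.Int.floordiv (ii-1) 2)
      else none := by
  obtain ⟨hrect, hlook⟩ := pv_grid_spec d hd
  have hN : (pvN d : Int) = 2*d+1 := by unfold pvN; omega
  have hlen : (pvBuildGrid d).length = pvN d := hrect.1
  have hcell : ∀ (a b : Int), 0 ≤ a → a < (pvN d : Int) → 0 ≤ b → b < (pvN d : Int) →
      ∀ (ha : a.toNat < (pvBuildGrid d).length)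
        (hb : b.toNat < ((pvBuildGrid d)[a.toNat]'ha).length),
      ((pvBuildGrid d)[a.toNat]'ha)[b.toNat]'hb = pvLookup (pvBuildGrid d) a b := by
    intro a b ha0 ha1 hb0 hb1 ha hb
    unfold pvLookup
    rw [PySem.List.pyGetD_eq_getElem _ _ ha0 (by omega),
        PySem.List.pyGetD_eq_getElem _ _ hb0 (by omega)]
  have hrowlen : ∀ (row : List (Option (String × Int))), row ∈ pvBuildGrid d → row.length = pvN d :=
    hrect.2
  have hlen2 : (pvBuildGrid d).length = (2*d+1).toNat := by rw [hlen]; unfold pvN; rfl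
  unfold pvTryNb
  by_cases hj2 : jj = 2*d+1
  · rw [hj2, (PySem.List.pyGet?_eq_none_iff _ _).mpr (by
      unfold PySem.Raise.InRange; omega)]
    rw [if_neg (by omega)]
    rfl
  · -- the row exists: jj ∈ [-1, 2d], so either a wrap to row 2d or a direct hit
    have hrowex : ∃ (a : Int) (h1 : 0 ≤ a) (h2 : a < (pvN d : Int)),
        PySem.List.pyGet? (pvBuildGrid d) jj = some ((pvBuildGrid d)[a.toNat]'(by omega)) ∧
        a % 2 = (if jj = -1 then 0 else 1) ∧
        (jj = -1 → a = 2*d) ∧ (jj ≠ -1 → a = jj) := by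
      by_cases hjm : jj = -1
      · refine ⟨2*d, by omega, by omega, ?_, by rw [if_pos hjm]; omega, fun _ => rfl, fun h => absurd hjm h⟩
        rw [hjm, PySem.List.pyGet?_neg_one, List.getLast?_eq_getElem?,
          show (pvBuildGrid d).length - 1 = (2*d : Int).toNat from by omega,
          List.getElem?_eq_getElem (by omega)]
      · refine ⟨jj, by omega, by omega, ?_, by rw [if_neg hjm]; omega, fun h => absurd h hjm, fun _ => rfl⟩
        exact PySem.List.pyGet?_eq_some_getElem _ (by omega) (by omega)
    obtain ⟨a, ha0, ha1, hga, hapar, hawrap, hadir⟩ := hrowex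
    rw [hga]
    simp only [Option.bind_some]
    have hrlen : ((pvBuildGrid d)[a.toNat]'(by omega)).length = pvN d :=
      hrect.2 _ (List.getElem_mem _)
    have hrlen2 : ((pvBuildGrid d)[a.toNat]'(by omega)).length = (2*d+1).toNat := by
      rw [hrlen]; unfold pvN; rfl
    by_cases hi2 : ii = 2*d+1
    · rw [hi2, (PySem.List.pyGet?_eq_none_iff _ _).mpr (by
        unfold PySem.Raise.InRange; omega)]
      rw [if_neg (by omega)]
      rfl
    · have hcolex : ∃ (b : Int) (g1 : 0 ≤ b) (g2 : b < (pvN d : Int)),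
          PySem.List.pyGet? ((pvBuildGrid d)[a.toNat]'(by omega)) ii =
            some (((pvBuildGrid d)[a.toNat]'(by omega))[b.toNat]'(by omega)) ∧
          b % 2 = (if ii = -1 then 0 else 1) ∧
          (ii = -1 → b = 2*d) ∧ (ii ≠ -1 → b = ii) := by
        by_cases him : ii = -1
        · refine ⟨2*d, by omega, by omega, ?_, by rw [if_pos him]; omega, fun _ => rfl, fun h => absurd him h⟩
          rw [him, PySem.List.pyGet?_neg_one, List.getLast?_eq_getElem?,
            show ((pvBuildGrid d)[a.toNat]'(by omega)).length - 1 = (2*d : Int).toNat from by omega,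
            List.getElem?_eq_getElem (by omega)]
        · refine ⟨ii, by omega, by omega, ?_, by rw [if_neg him]; omega, fun h => absurd h him, fun _ => rfl⟩
          exact PySem.List.pyGet?_eq_some_getElem _ (by omega) (by omega)
      obtain ⟨b, hb0, hb1, hgb, hbpar, hbwrap, hbdir⟩ := hcolex
      rw [hgb]
      simp only [Option.bind_some]
      rw [hcell a b ha0 ha1 hb0 hb1 (by omega) (by omega), hlook a b ha0 ha1 hb0 hb1]
      unfold pvCellSpec
      by_cases hjm : jj = -1
      · have ha2 : a = 2*d := hawrap hjm
        have hap : a % 2 = 0 := by rw [hapar, if_pos hjm]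
        rw [if_neg (by unfold pvLpos; omega), if_neg (by unfold pvXpos; omega),
          if_neg (by unfold pvZpos; omega), if_neg (by omega)]
        rfl
      · have ha2 : a = jj := hadir hjm
        have hap : a % 2 = 1 := by rw [hapar, if_neg hjm]
        by_cases him : ii = -1
        · have hb2 : b = 2*d := hbwrap him
          have hbp : b % 2 = 0 := by rw [hbpar, if_pos him]
          rw [if_neg (by unfold pvLpos; omega), if_neg (by unfold pvXpos; omega),
            if_neg (by unfold pvZpos; omega), if_neg (by omega)]
          rfl
        · have hb2 : b = ii := hbdir him
          have hbp : b % 2 = 1 := by rw [hbpar, if_neg him]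
          rw [if_pos (by unfold pvLpos; omega), if_pos (by omega)]
          subst ha2 hb2
          rfl

-- the core of B's neighbour list, before padding
def pvNbCore (d : Int) (j i : Int) : List Int :=
  [(1 : Int), -1].foldl (fun l a =>
    [(1 : Int), -1].foldl (fun l b =>
      if 0 ≤ j + a ∧ j + a ≤ 2*d ∧ 0 ≤ i + b ∧ i + b ≤ 2*d then
        l ++ [PySem.Int.floordiv (j + a - 1) 2 * d + PySem.Int.floordiv (i + b - 1) 2]
      else l) l) []

theorem pv_nb_eq (d : Int) (hd : 1 ≤ d) (j i : Int)
    (hj : j % 2 = 0) (hi : i % 2 = 0)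
    (hj0 : 0 ≤ j) (hj1 : j ≤ 2*d) (hi0 : 0 ≤ i) (hi1 : i ≤ 2*d) :
    pvNbA (pvBuildGrid d) j i = pvNbCore d j i := by
  unfold pvNbA pvNbCore
  simp only [List.foldl_cons, List.foldl_nil]
  rw [pv_tryNb_char d hd (j+1) (i+1) (by omega) (by omega) (by omega) (by omega) (by omega) (by omega),
      pv_tryNb_char d hd (j+1) (i+(-1)) (by omega) (by omega) (by omega) (by omega) (by omega) (by omega),
      pv_tryNb_char d hd (j+(-1)) (i+1) (by omega) (by omega) (by omega) (by omega) (by omega) (by omega),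
      pv_tryNb_char d hd (j+(-1)) (i+(-1)) (by omega) (by omega) (by omega) (by omega) (by omega) (by omega)]
  split_ifs <;> rfl

theorem pv_nbCore_len (d : Int) (j i : Int) : (pvNbCore d j i).length ≤ 4 := by
  unfold pvNbCore
  simp only [List.foldl_cons, List.foldl_nil]
  split_ifs <;> simp

theorem pv_pad_eq : ∀ (k : Nat) (l : List Int), l.length + k = 4 →
    pvPad l = l ++ List.replicate k (-1) := by
  intro k
  induction k with
  | zero =>
    intro l hl
    rw [pvPad, if_neg (by omega)]
    simp
  | succ k ih =>
    intro l hl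
    rw [pvPad, if_pos (by omega), ih (l ++ [-1]) (by simp; omega)]
    simp [List.replicate_succ]

theorem pv_item_eq (d : Int) (hd : 1 ≤ d) (padded : Bool) (j i : Int)
    (hj : j % 2 = 0) (hi : i % 2 = 0)
    (hj0 : 0 ≤ j) (hj1 : j ≤ 2*d) (hi0 : 0 ≤ i) (hi1 : i ≤ 2*d) :
    (let cur := pvNbA (pvBuildGrid d) j i; if padded then pvPad cur else cur) =
      pvNbB d padded j i := by
  rw [pv_nb_eq d hd j i hj hi hj0 hj1 hi0 hi1]
  unfold pvNbB pvNbCore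
  cases padded
  · rfl
  · simp only [if_true]
    exact pv_pad_eq (4 - (pvNbCore d j i).length) (pvNbCore d j i)
      (by have := pv_nbCore_len d j i; omega)

-- ---------- scan assembly ----------

theorem pv_foldl_append_ite (p : Int → Prop) [DecidablePred p] (f : Int → List Int) :
    ∀ (l : List Int) (acc : List (List Int)),
    l.foldl (fun a i => if p i then a ++ [f i] else a) acc =
      acc ++ (l.filter (fun i => decide (p i))).map f := by
  intro l
  induction l with
  | nil => intro acc; simp
  | cons x xs ih =>
    intro acc
    simp only [List.foldl_cons, List.filter_cons]
    by_cases hp : p x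
    · rw [if_pos hp, ih]
      simp [hp]
    · rw [if_neg hp, ih]
      simp [hp]

theorem pv_fold_two (p : Int → Int → Prop) [∀ j i, Decidable (p j i)]
    (f : Int → Int → List Int) (ir : List Int) :
    ∀ (jr : List Int) (acc : List (List Int)),
    jr.foldl (fun a j => ir.foldl (fun a i => if p j i then a ++ [f j i] else a) a) acc =
      acc ++ jr.flatMap (fun j => (ir.filter (fun i => decide (p j i))).map (f j)) := by
  intro jr
  induction jr with
  | nil => intro acc; simp
  | cons j rest ih =>
    intro acc
    simp only [List.foldl_cons, List.flatMap_cons]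
    rw [pv_foldl_append_ite, ih]
    simp [List.append_assoc]

theorem pv_main_pos (d : Int) (hd : 1 ≤ d) (padded : Bool) :
    get_stabs d padded = get_stabs_alt d padded := by
  have hN : (pvN d : Int) = 2*d+1 := by unfold pvN; omega
  obtain ⟨hrect, hlook⟩ := pv_grid_spec d hd
  have hpm : ∀ (s : List (List Int) × List (List Int)) (j : Int),
      (PySem.List.pyRange 0 (2*d+1) 1).foldl (fun s' i =>
        ((if pvXpos d j i then s'.1 ++ [pvNbB d padded j i] else s'.1),
         (if pvZpos d j i then s'.2 ++ [pvNbB d padded j i] else s'.2))) s =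
      ((PySem.List.pyRange 0 (2*d+1) 1).foldl
          (fun a i => if pvXpos d j i then a ++ [pvNbB d padded j i] else a) s.1,
       (PySem.List.pyRange 0 (2*d+1) 1).foldl
          (fun a i => if pvZpos d j i then a ++ [pvNbB d padded j i] else a) s.2) := by
    intro s j
    obtain ⟨a, b⟩ := s
    exact PySem.List.foldl_prod_mk
      (fun a i => if pvXpos d j i then a ++ [pvNbB d padded j i] else a)
      (fun b i => if pvZpos d j i then b ++ [pvNbB d padded j i] else b) _ a b
  have h1 : get_stabs d padded =
      (PySem.List.pyRange 0 (2*d+1) 1).foldl (fun s j =>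
        ((PySem.List.pyRange 0 (2*d+1) 1).foldl
            (fun a i => if pvXpos d j i then a ++ [pvNbB d padded j i] else a) s.1,
         (PySem.List.pyRange 0 (2*d+1) 1).foldl
            (fun a i => if pvZpos d j i then a ++ [pvNbB d padded j i] else a) s.2))
        (([], []) : List (List Int) × List (List Int)) := by
    unfold get_stabs
    dsimp only
    refine PySem.List.foldl_congr_mem _ _ _ _ ?_
    intro s j hj
    have hjb := (PySem.List.mem_pyRange_one).mp hj
    have hcell : ∀ (s' : List (List Int) × List (List Int)), ∀ i ∈ PySem.List.pyRange 0 (2*d+1) 1,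
        (match pvLookup (pvBuildGrid d) j i with
         | none => s'
         | some cell =>
           ((if cell.1 == "X" then
               s'.1 ++ [if padded = true then pvPad (pvNbA (pvBuildGrid d) j i)
                        else pvNbA (pvBuildGrid d) j i]
             else s'.1),
            (if cell.1 == "Z" then
               s'.2 ++ [if padded = true then pvPad (pvNbA (pvBuildGrid d) j i)
                        else pvNbA (pvBuildGrid d) j i]
             else s'.2))) =
        ((if pvXpos d j i then s'.1 ++ [pvNbB d padded j i] else s'.1),
         (if pvZpos d j i then s'.2 ++ [pvNbB d padded j i] else s'.2)) := by
      intro s' i hi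
      have hib := (PySem.List.mem_pyRange_one).mp hi
      rw [hlook j i (by omega) (by omega) (by omega) (by omega)]
      unfold pvCellSpec
      by_cases hLp : pvLpos d j i
      · have hnx : ¬ pvXpos d j i := by unfold pvLpos at hLp; unfold pvXpos; omega
        have hnz : ¬ pvZpos d j i := by unfold pvLpos at hLp; unfold pvZpos; omega
        rw [if_pos hLp, if_neg hnx, if_neg hnz]
        simp
      · rw [if_neg hLp]
        by_cases hXp : pvXpos d j i
        · have hnz : ¬ pvZpos d j i := by unfold pvXpos at hXp; unfold pvZpos; omega
          have hitem : (if padded = true then pvPad (pvNbA (pvBuildGrid d) j i)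
              else pvNbA (pvBuildGrid d) j i) = pvNbB d padded j i := by
            have hXp' := hXp
            unfold pvXpos at hXp'
            exact pv_item_eq d hd padded j i (by omega) (by omega) (by omega) (by omega) (by omega) (by omega)
          repeat rw [if_pos hXp]
          repeat rw [if_neg hnz]
          repeat rw [hitem]
          simp
        · rw [if_neg hXp]
          by_cases hZp : pvZpos d j i
          · have hitem : (if padded = true then pvPad (pvNbA (pvBuildGrid d) j i)
                else pvNbA (pvBuildGrid d) j i) = pvNbB d padded j i := by
              have hZp' := hZp
              unfold pvZpos at hZp'
              exact pv_item_eq d hd padded j i (by omega) (by omega) (by omega) (by omega) (by omega) (by omega)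
            repeat rw [if_pos hZp]
            repeat rw [if_neg hXp]
            repeat rw [hitem]
            simp
          · rw [if_neg hZp]
            simp [hXp, hZp]
    calc (PySem.List.pyRange 0 (2*d+1) 1).foldl _ s
        = (PySem.List.pyRange 0 (2*d+1) 1).foldl (fun s' i =>
            ((if pvXpos d j i then s'.1 ++ [pvNbB d padded j i] else s'.1),
             (if pvZpos d j i then s'.2 ++ [pvNbB d padded j i] else s'.2))) s :=
          PySem.List.foldl_congr_mem _ _ _ _ hcell
      _ = _ := hpm s j
  -- X component
  have hXeq : (PySem.List.pyRange 0 (2*d+1) 1).flatMap (fun j =>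
      ((PySem.List.pyRange 0 (2*d+1) 1).filter (fun i => decide (pvXpos d j i))).map
        (fun i => pvNbB d padded j i)) =
      (PySem.List.pyRange 0 (2*d+1) 2).flatMap (fun j =>
      ((PySem.List.pyRange 2 (2*d-1) 2).filter (fun i =>
          (PySem.Int.mod i 4 == 2 && PySem.Int.mod j 4 == 0) ||
          (PySem.Int.mod i 4 == 0 && PySem.Int.mod j 4 == 2))).map
        (fun i => pvNbB d padded j i)) := by
    rw [pv_flatMap_filter_of_nil _ (fun j => decide (j % 2 = 0)) _ (by
      intro j hj hq
      rw [List.filter_eq_nil_iff.mpr, List.map_nil]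
      intro i hi
      simp only [decide_eq_true_eq]
      unfold pvXpos
      simp only [decide_eq_false_iff_not, decide_eq_true_eq] at hq
      omega)]
    have hfe : (PySem.List.pyRange 0 (2*d+1) 1).filter (fun j => decide (j % 2 = 0)) =
        PySem.List.pyRange 0 (2*d+1) 2 := by
      refine pv_eq_of_sorted_mem _ _ (List.Pairwise.filter _ (PySem.List.pairwise_lt_pyRange_one 0 (2*d+1)))
        (pv_pairwise_pyRange_two 0 (2*d+1)) ?_
      intro x
      rw [List.mem_filter, PySem.List.mem_pyRange_one, pv_mem_pyRange_two]
      simp only [decide_eq_true_eq]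
      omega
    rw [hfe]
    refine pv_flatMap_congr _ _ _ ?_
    intro j hj
    rw [pv_mem_pyRange_two] at hj
    congr 1
    refine pv_eq_of_sorted_mem _ _ (List.Pairwise.filter _ (PySem.List.pairwise_lt_pyRange_one 0 (2*d+1)))
      (List.Pairwise.filter _ (pv_pairwise_pyRange_two 2 (2*d-1))) ?_
    intro x
    rw [List.mem_filter, List.mem_filter, PySem.List.mem_pyRange_one, pv_mem_pyRange_two]
    simp only [decide_eq_true_eq, Bool.or_eq_true, Bool.and_eq_true, beq_iff_eq,
      PySem.Int.mod_eq_emod_of_pos (show (0:Int) < 4 by norm_num)]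
    unfold pvXpos
    omega
  -- Z component
  have hZeq : (PySem.List.pyRange 0 (2*d+1) 1).flatMap (fun j =>
      ((PySem.List.pyRange 0 (2*d+1) 1).filter (fun i => decide (pvZpos d j i))).map
        (fun i => pvNbB d padded j i)) =
      (PySem.List.pyRange 2 (2*d-1) 2).flatMap (fun j =>
      ((PySem.List.pyRange 0 (2*d+1) 2).filter (fun i =>
          (PySem.Int.mod i 4 == 0 && PySem.Int.mod j 4 == 0) ||
          (PySem.Int.mod i 4 == 2 && PySem.Int.mod j 4 == 2))).map
        (fun i => pvNbB d padded j i)) := by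
    rw [pv_flatMap_filter_of_nil _ (fun j => decide (2 ≤ j ∧ j ≤ 2*d - 2 ∧ j % 2 = 0)) _ (by
      intro j hj hq
      rw [List.filter_eq_nil_iff.mpr, List.map_nil]
      intro i hi
      simp only [decide_eq_true_eq]
      unfold pvZpos
      simp only [decide_eq_false_iff_not, decide_eq_true_eq] at hq
      omega)]
    have hfe : (PySem.List.pyRange 0 (2*d+1) 1).filter (fun j => decide (2 ≤ j ∧ j ≤ 2*d - 2 ∧ j % 2 = 0)) =
        PySem.List.pyRange 2 (2*d-1) 2 := by
      refine pv_eq_of_sorted_mem _ _ (List.Pairwise.filter _ (PySem.List.pairwise_lt_pyRange_one 0 (2*d+1)))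
        (pv_pairwise_pyRange_two 2 (2*d-1)) ?_
      intro x
      rw [List.mem_filter, PySem.List.mem_pyRange_one, pv_mem_pyRange_two]
      simp only [decide_eq_true_eq]
      omega
    rw [hfe]
    refine pv_flatMap_congr _ _ _ ?_
    intro j hj
    rw [pv_mem_pyRange_two] at hj
    congr 1
    refine pv_eq_of_sorted_mem _ _ (List.Pairwise.filter _ (PySem.List.pairwise_lt_pyRange_one 0 (2*d+1)))
      (List.Pairwise.filter _ (pv_pairwise_pyRange_two 0 (2*d+1))) ?_
    intro x
    rw [List.mem_filter, List.mem_filter, PySem.List.mem_pyRange_one, pv_mem_pyRange_two]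
    simp only [decide_eq_true_eq, Bool.or_eq_true, Bool.and_eq_true, beq_iff_eq,
      PySem.Int.mod_eq_emod_of_pos (show (0:Int) < 4 by norm_num)]
    unfold pvZpos
    omega
  refine h1.trans ?_
  have hsplit2 := PySem.List.foldl_prod_mk
      (fun a (j : Int) => (PySem.List.pyRange 0 (2*d+1) 1).foldl
        (fun a i => if pvXpos d j i then a ++ [pvNbB d padded j i] else a) a)
      (fun b (j : Int) => (PySem.List.pyRange 0 (2*d+1) 1).foldl
        (fun b i => if pvZpos d j i then b ++ [pvNbB d padded j i] else b) b)
      (PySem.List.pyRange 0 (2*d+1) 1) ([] : List (List Int)) ([] : List (List Int))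
  refine hsplit2.trans ?_
  refine (congrArg₂ Prod.mk
      (pv_fold_two (fun j i => pvXpos d j i) (fun j i => pvNbB d padded j i)
        (PySem.List.pyRange 0 (2*d+1) 1) (PySem.List.pyRange 0 (2*d+1) 1) [])
      (pv_fold_two (fun j i => pvZpos d j i) (fun j i => pvNbB d padded j i)
        (PySem.List.pyRange 0 (2*d+1) 1) (PySem.List.pyRange 0 (2*d+1) 1) [])).trans ?_
  exact (congrArg₂ Prod.mk hXeq hZeq).trans rfl

theorem pv_main_neg (d : Int) (hd : d < 0) (padded : Bool) :
    get_stabs d padded = get_stabs_alt d padded := by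
  unfold get_stabs get_stabs_alt
  dsimp only
  rw [PySem.List.pyRange_one_eq_nil (by omega),
      pv_pyRange_two_nil 0 (2*d+1) (by omega),
      pv_pyRange_two_nil 2 (2*d-1) (by omega)]
  simp

theorem pv_main (d : Int) (padded : Bool) : get_stabs d padded = get_stabs_alt d padded := by
  rcases lt_trichotomy d 0 with h | h | h
  · exact pv_main_neg d h padded
  · subst h; cases padded <;> decide
  · exact pv_main_pos d h padded

-- ===== VERDICT (by name: the statement is the Claim_ definition above) =====
theorem get_stabs_spec : Claim_equal_get_stabs := by
  intro d padded _
  unfold Spec_get_stabs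
  exact pv_main d padded
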